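-- pv_equiv track=rewrite | github.com/fre-eyesus/-A2SV_Solved_Questions | 2515-shortest-distance-to-target-string-in-a-circular-array/2515-shortest-distance-to-target-string-in-a-circular-array.py | closestTarget
-- ===== SOURCE A (Python) =====
-- from typing import List
--
-- def closestTarget(words: List[str], target: str, startIndex: int) -> int:
--     if target not in words:
--         return -1
--     ans = n = len(words)
--
--     for i, word in enumerate(words):
--         if word == target:
--             ans = min(ans, abs(i - startIndex), n - abs(i - startIndex))
--     return ans
-- ===== SOURCE B (Python) =====
-- def closestTarget(words, target, startIndex):
--     n = len(words)
--     if n == 0: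
--         return -1
--     for d in range(n // 2 + 1):
--         if words[(startIndex + d) % n] == target or words[(startIndex - d) % n] == target:
--             return d
--     return -1
-- ===== Notes on version B (the rewrite author's own statement) =====
-- stated objective: alternative
-- what changed: Instead of A's scan over all indices accumulating the minimal circular distance, B searches outward from startIndex by growing distance d, probing words[(startIndex+d)%n] and words[(startIndex-d)%n], and returns the first d that hits (early exit), -1 if the ring has no target.
-- outside the precondition, e.g. on closestTarget(['a', 'b'], 'a', 5): A returns -3, B returns 1
import Mathlib
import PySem

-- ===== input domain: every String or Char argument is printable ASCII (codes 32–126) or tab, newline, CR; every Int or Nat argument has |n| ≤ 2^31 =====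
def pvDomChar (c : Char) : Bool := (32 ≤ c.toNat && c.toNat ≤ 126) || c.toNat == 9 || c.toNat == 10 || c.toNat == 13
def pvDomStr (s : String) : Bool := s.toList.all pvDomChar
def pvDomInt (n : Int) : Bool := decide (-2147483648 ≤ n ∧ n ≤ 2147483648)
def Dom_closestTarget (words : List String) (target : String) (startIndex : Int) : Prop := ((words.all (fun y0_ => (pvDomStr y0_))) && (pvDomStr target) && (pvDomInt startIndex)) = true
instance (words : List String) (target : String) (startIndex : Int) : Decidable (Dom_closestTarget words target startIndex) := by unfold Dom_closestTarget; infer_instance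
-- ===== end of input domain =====

-- B replaces A's full scan (minimum circular distance over all matches) by an outward
-- search from startIndex: probe positions (startIndex±d) mod n for growing d, returning
-- the first hit; alternative traversal with early exit, same cost class.

-- ===== PORT A =====
def closestTarget (words : List String) (target : String) (startIndex : Int) : Int :=
  if ¬ words.contains target then -1
  else
    let n : Int := words.length
    (PySem.List.enumerate words).foldl
      (fun ans iw =>
        if iw.2 == target then
          min (min ans |iw.1 - startIndex|) (n - |iw.1 - startIndex|)
        else ans) n

-- ===== PORT B =====
-- words[(s+d) % n] == target or words[(s-d) % n] == target  (indices are in range, so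
-- pyGet? is exact: it returns some of the element Python reads)
def probeB (words : List String) (target : String) (n s d : Int) : Bool :=
  (PySem.List.pyGet? words (PySem.Int.mod (s + d) n) == some target) ||
  (PySem.List.pyGet? words (PySem.Int.mod (s - d) n) == some target)

-- the 'for d in range(...): if …: return d' loop, ported as first-hit recursion
def loopB (words : List String) (target : String) (n s : Int) : List Int → Int
  | [] => -1
  | d :: ds => if probeB words target n s d then d else loopB words target n s ds

def closestTarget_alt (words : List String) (target : String) (startIndex : Int) : Int :=
  let n : Int := words.length
  if n = 0 then -1
  else loopB words target n startIndex (PySem.List.pyRange 0 (PySem.Int.floordiv n 2 + 1) 1)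

-- ===== PRECONDITION & SPEC =====
-- Pre_ requires startIndex to be a valid position, 0 ≤ startIndex < len(words) (the
-- problem's guaranteed domain), whenever target occurs in words (if it is absent both
-- programs return -1 for any startIndex). On the excluded inputs A still returns: it
-- measures raw offsets from a nonexistent position (possibly negative results), while B
-- measures from the wrapped position; neither corner value is specified.
def Pre_closestTarget (words : List String) (target : String) (startIndex : Int) : Prop :=
  ¬ words.contains target ∨ (0 ≤ startIndex ∧ startIndex < (words.length : Int))
instance (words : List String) (target : String) (startIndex : Int) : Decidable (Pre_closestTarget words target startIndex) := by unfold Pre_closestTarget; infer_instance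

def pvWitness_closestTarget : List String × String × Int := (["a", "b", "c"], "b", 0)

def Spec_closestTarget (words : List String) (target : String) (startIndex : Int) (out : Int) : Prop := out = closestTarget_alt words target startIndex
instance (words : List String) (target : String) (startIndex : Int) (out : Int) : Decidable (Spec_closestTarget words target startIndex out) := by unfold Spec_closestTarget; infer_instance

-- ===== CLAIM (what is proved, stated in full; the proofs are below) =====
def Claim_equal_closestTarget : Prop := ∀ (words : List String) (target : String) (startIndex : Int), Dom_closestTarget words target startIndex → Pre_closestTarget words target startIndex → Spec_closestTarget words target startIndex (closestTarget words target startIndex)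

-- ===== LEMMAS AND PROOFS =====

-- the distances A inspects: |i - s| at each match, in scan order
def dsOf (words : List String) (target : String) (s : Int) : List Int :=
  (PySem.List.enumerate words).filterMap
    (fun iw => if iw.2 == target then some |iw.1 - s| else none)

-- A's fold over enumerate equals the circular-min fold over the distance list
theorem fold_filterMap (s : Int) (n : Int) (t : String) :
    ∀ (L : List (Int × String)) (acc : Int),
      L.foldl (fun ans iw => if iw.2 == t then min (min ans |iw.1 - s|) (n - |iw.1 - s|) else ans) acc
      = (L.filterMap (fun iw => if iw.2 == t then some |iw.1 - s| else none)).foldl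
          (fun ans d => min (min ans d) (n - d)) acc := by
  intro L
  induction L with
  | nil => intro acc; rfl
  | cons x L ih =>
    intro acc
    cases hx : (x.2 == t) <;>
      simp only [List.foldl_cons, List.filterMap_cons, hx, Bool.false_eq_true, if_false, if_true,
        List.foldl_cons] <;> exact ih _

-- membership in the distance list
theorem mem_dsOf (words : List String) (target : String) (s a : Int) :
    a ∈ dsOf words target s ↔
      ∃ (k : Nat) (h : k < words.length), words[k] = target ∧ a = |(k : Int) - s| := by
  unfold dsOf
  rw [List.mem_filterMap]
  constructor
  · rintro ⟨p, hp, hf⟩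
    rcases (PySem.List.mem_enumerate_iff _ _ _).mp hp with ⟨k, hk, rfl⟩
    by_cases h : words[k] = target
    · exact ⟨k, hk, h, by simp [h] at hf; omega⟩
    · simp [h] at hf
  · rintro ⟨k, hk, hkt, rfl⟩
    exact ⟨((0 : Int) + k, words[k]),
      (PySem.List.mem_enumerate_iff _ _ _).mpr ⟨k, hk, rfl⟩, by simp [hkt]⟩

-- the distance list is empty exactly when the target is absent
theorem dsOf_nil_gen (words : List String) (t : String) (s : Int) :
    ∀ k : Int, (PySem.List.enumerate words k).filterMap
      (fun iw => if iw.2 == t then some |iw.1 - s| else none) = [] ↔ ¬ words.contains t := by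
  induction words with
  | nil => intro k; simp [PySem.List.enumerate_nil]
  | cons w ws ih =>
    intro k
    by_cases h : w = t
    · subst h
      simp [PySem.List.enumerate_cons]
    · have ht : ¬ t = w := fun e => h e.symm
      rw [PySem.List.enumerate_cons, List.filterMap_cons_none (f := fun (iw : Int × String) => if iw.2 == t then some |iw.1 - s| else none) (by simp [h]), ih (k + 1)]
      simp [ht]

theorem dsOf_nil_iff (words : List String) (t : String) (s : Int) :
    dsOf words t s = [] ↔ ¬ words.contains t :=
  dsOf_nil_gen words t s 0

-- an in-range Python index reads the list element
theorem pyGet?_bounds (xs : List String) (j : Int) (h1 : 0 ≤ j) (h2 : j < (xs.length : Int)) :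
    PySem.List.pyGet? xs j = xs[j.toNat]? := by
  simp [PySem.List.pyGet?, PySem.List.pyIdx?, h1, h2]

theorem mem_of_pyGet? (xs : List String) (j : Int) (t : String)
    (h : PySem.List.pyGet? xs j = some t) : t ∈ xs := by
  simp only [PySem.List.pyGet?, Option.bind_eq_some_iff] at h
  rcases h with ⟨k, -, hk⟩
  exact List.mem_of_getElem? hk

-- x % n pinned down on the three windows around [0, n)
theorem emod_three (x n k : Int) (hn : 0 < n) (hk : 0 ≤ k) (hkn : k < n)
    (h : x = k ∨ x = k + n ∨ x = k - n) : x % n = k := by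
  rcases h with rfl | rfl | rfl
  · exact Int.emod_eq_of_lt hk hkn
  · rw [Int.add_emod_right]; exact Int.emod_eq_of_lt hk hkn
  · rw [Int.sub_emod_right]; exact Int.emod_eq_of_lt hk hkn

theorem emod_window (x n : Int) (hn : 0 < n) (h1 : -n ≤ x) (h2 : x < 2 * n) :
    x % n = x ∨ x % n = x - n ∨ x % n = x + n := by
  rcases lt_or_ge x 0 with hx | hx
  · right; right; rw [← Int.add_emod_right]; exact Int.emod_eq_of_lt (by omega) (by omega)
  · rcases lt_or_ge x n with hx2 | hx2
    · left; exact Int.emod_eq_of_lt hx hx2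
    · right; left; rw [← Int.sub_emod_right]; exact Int.emod_eq_of_lt (by omega) (by omega)

-- a probe at d hits when some match sits at (s+d) % n or (s-d) % n
theorem probe_hit (words : List String) (t : String) (s d : Int) (k : Nat)
    (hk : k < words.length) (hkt : words[k] = t)
    (h : PySem.Int.mod (s + d) (words.length : Int) = k ∨
         PySem.Int.mod (s - d) (words.length : Int) = k) :
    probeB words t (words.length : Int) s d = true := by
  have hget : PySem.List.pyGet? words ((k : Int)) = some t := by
    rw [pyGet?_bounds words k (Int.natCast_nonneg k) (by exact_mod_cast hk)]
    simp only [Int.toNat_natCast]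
    rw [List.getElem?_eq_getElem hk, hkt]
  unfold probeB
  rcases h with h | h <;> rw [h] <;> simp [hget]

-- first-hit recursion over an integer range returns the least probe-true value
theorem loopB_eq_of_least (words : List String) (t : String) (n s b : Int) :
    ∀ (k : Nat) (a v : Int), b - a = k → a ≤ v → v < b → probeB words t n s v = true →
      (∀ x, a ≤ x → x < v → probeB words t n s x = false) →
      loopB words t n s (PySem.List.pyRange a b 1) = v := by
  intro k
  induction k with
  | zero => intro a v hba hav hvb _ _; omega
  | succ m ih =>
    intro a v hba hav hvb hp hmin
    have hab : a < b := by omega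
    rw [PySem.List.pyRange_one_cons hab]
    by_cases hv : a = v
    · subst hv; simp [loopB, hp]
    · have hfa : probeB words t n s a = false := hmin a le_rfl (by omega)
      simp only [loopB, hfa, Bool.false_eq_true, if_false]
      exact ih (a + 1) v (by omega) (by omega) hvb hp (fun x h1 h2 => hmin x (by omega) h2)

theorem loopB_none (words : List String) (t : String) (n s : Int) :
    ∀ (L : List Int), (∀ x ∈ L, probeB words t n s x = false) → loopB words t n s L = -1 := by
  intro L h
  induction L with
  | nil => rfl
  | cons d ds ih =>
    simp only [loopB, h d List.mem_cons_self, Bool.false_eq_true, if_false]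
    exact ih (fun x hx => h x (List.mem_cons_of_mem _ hx))

-- a probe hit exhibits a match whose circular distance is at most d
theorem probe_exhibits (words : List String) (t : String) (s d : Int)
    (hs : 0 ≤ s) (hsn : s < (words.length : Int)) (hd : 0 ≤ d) (hdn : d < (words.length : Int))
    (hp : probeB words t (words.length : Int) s d = true) :
    ∃ a ∈ dsOf words t s, min a ((words.length : Int) - a) ≤ d := by
  have hn : (0 : Int) < (words.length : Int) := by omega
  unfold probeB at hp
  rw [Bool.or_eq_true, beq_iff_eq, beq_iff_eq] at hp
  have core : ∀ x : Int, -(words.length : Int) ≤ x → x < 2 * (words.length : Int) →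
      (|x - s| = d ∨ |x - s| = (words.length : Int) - d) →
      PySem.List.pyGet? words (PySem.Int.mod x (words.length : Int)) = some t →
      ∃ a ∈ dsOf words t s, min a ((words.length : Int) - a) ≤ d := by
    intro x hx1 hx2 hxd hg
    have hj1 : 0 ≤ PySem.Int.mod x (words.length : Int) := PySem.Int.mod_nonneg x hn
    have hj2 : PySem.Int.mod x (words.length : Int) < (words.length : Int) := PySem.Int.mod_lt x hn
    set j := PySem.Int.mod x (words.length : Int) with hjdef
    have hje : j = x % (words.length : Int) := by
      rw [hjdef, PySem.Int.mod_eq_emod_of_pos hn]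
    have hwin := emod_window x (words.length : Int) hn hx1 hx2
    rw [pyGet?_bounds words j hj1 hj2] at hg
    have hklt : j.toNat < words.length := by omega
    rw [List.getElem?_eq_getElem hklt] at hg
    have hkt : words[j.toNat] = t := by injection hg
    refine ⟨|(j.toNat : Int) - s|, (mem_dsOf words t s _).mpr ⟨j.toNat, hklt, hkt, rfl⟩, ?_⟩
    have hjcast : ((j.toNat : Int)) = j := by omega
    rw [hjcast]
    -- j = x, x - n, or x + n;  |x - s| = d or n - d;  so min(|j-s|, n-|j-s|) ≤ d
    rcases hxd with hxd | hxd <;> rcases abs_sub_abs_le_abs_sub (x - s) 0 with - <;>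
      rcases abs_cases (x - s) with ⟨hax, -⟩ | ⟨hax, -⟩ <;>
      rcases abs_cases (j - s) with ⟨haj, -⟩ | ⟨haj, -⟩ <;> omega
  rcases hp with hp | hp
  · refine core (s + d) (by omega) (by omega) ?_ hp
    left; rw [add_sub_cancel_left]; exact abs_of_nonneg hd
  · refine core (s - d) (by omega) (by omega) ?_ hp
    left
    have hx : s - d - s = -d := by ring
    rw [hx, abs_neg]; exact abs_of_nonneg hd

-- every match's circular distance is probe-true
theorem probe_of_mem (words : List String) (t : String) (s a : Int)
    (hs : 0 ≤ s) (hsn : s < (words.length : Int)) (ha : a ∈ dsOf words t s) :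
    probeB words t (words.length : Int) s (min a ((words.length : Int) - a)) = true := by
  rcases (mem_dsOf words t s a).mp ha with ⟨k, hk, hkt, rfl⟩
  have hn : (0 : Int) < (words.length : Int) := by omega
  have hkn : ((k : Int)) < (words.length : Int) := by exact_mod_cast hk
  have hk0 : (0 : Int) ≤ (k : Int) := Int.natCast_nonneg k
  apply probe_hit words t s _ k hk hkt
  rcases min_cases |(k : Int) - s| ((words.length : Int) - |(k : Int) - s|) with ⟨hd, hle⟩ | ⟨hd, hle⟩ <;>
    rw [hd] <;> rcases abs_cases ((k : Int) - s) with ⟨he, h2⟩ | ⟨he, h2⟩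
  · left; rw [PySem.Int.mod_eq_emod_of_pos hn]; exact emod_three _ _ _ hn hk0 hkn (by omega)
  · right; rw [PySem.Int.mod_eq_emod_of_pos hn]; exact emod_three _ _ _ hn hk0 hkn (by omega)
  · right; rw [PySem.Int.mod_eq_emod_of_pos hn]; exact emod_three _ _ _ hn hk0 hkn (by omega)
  · left; rw [PySem.Int.mod_eq_emod_of_pos hn]; exact emod_three _ _ _ hn hk0 hkn (by omega)

-- every inspected distance lies in [0, n)
theorem dsOf_bounds (words : List String) (t : String) (s a : Int)
    (hs : 0 ≤ s) (hsn : s < (words.length : Int)) (ha : a ∈ dsOf words t s) :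
    0 ≤ a ∧ a < (words.length : Int) := by
  rcases (mem_dsOf words t s a).mp ha with ⟨k, hk, -, rfl⟩
  have hkn : ((k : Int)) < (words.length : Int) := by exact_mod_cast hk
  rcases abs_cases ((k : Int) - s) with ⟨he, h2⟩ | ⟨he, h2⟩ <;>
    constructor <;> omega

-- ===== VERDICT (by name: the statement is the Claim_ definition above) =====
theorem closestTarget_spec : Claim_equal_closestTarget := by
  intro words target s _ hpre
  unfold Spec_closestTarget closestTarget closestTarget_alt
  by_cases hn0 : (words.length : Int) = 0
  · -- empty list: A's membership test fails, B's empty guard fires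
    have hwe : words = [] := by
      cases words with
      | nil => rfl
      | cons w ws => exfalso; simp at hn0; omega
    subst hwe
    simp
  simp only [if_neg hn0]
  rw [PySem.Int.floordiv_eq_ediv_of_pos (by omega : (0:Int) < 2)]
  by_cases hc : words.contains target
  · obtain ⟨hs, hsn⟩ : 0 ≤ s ∧ s < (words.length : Int) := by
      rcases hpre with h | h
      · exact absurd hc h
      · exact h
    have hn : (0 : Int) < (words.length : Int) := by
      have := Int.natCast_nonneg words.length
      omega
    rw [if_neg (not_not_intro hc), fold_filterMap]
    have hfold : (dsOf words target s).foldl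
        (fun ans d => min (min ans d) ((words.length : Int) - d)) (words.length : Int)
        = ((dsOf words target s).map
            (fun a => min a ((words.length : Int) - a))).foldl min (words.length : Int) := by
      rw [List.foldl_map]
      apply PySem.List.foldl_congr_mem
      intro acc x _
      exact min_assoc acc x _
    show (dsOf words target s).foldl _ _ = _
    rw [hfold]
    set n : Int := (words.length : Int) with hndef
    set cds := (dsOf words target s).map (fun a => min a (n - a)) with hcds
    set v := cds.foldl min n with hv
    have hle := PySem.List.foldl_min_le cds n
    have hmem := PySem.List.foldl_min_mem cds n
    -- the distance list is nonempty, and every circular distance is < n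
    have hne : dsOf words target s ≠ [] := fun h => (dsOf_nil_iff words target s).mp h hc
    have hcd_lt : ∀ y ∈ cds, 0 ≤ y ∧ y < n ∧ y ≤ n / 2 := by
      intro y hy
      rcases List.mem_map.mp hy with ⟨a, ha, rfl⟩
      have := dsOf_bounds words target s a hs hsn ha
      constructor; · omega
      constructor; · omega
      · omega
    have hvcds : v ∈ cds := by
      rcases hmem with h | h
      · exfalso
        rcases List.exists_mem_of_ne_nil _ hne with ⟨a0, ha0⟩
        have h0 : min a0 (n - a0) ∈ cds := List.mem_map_of_mem ha0
        have := (hcd_lt _ h0).2.1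
        have := hle.2 _ h0
        omega
      · exact h
    rcases List.mem_map.mp hvcds with ⟨a, ha, hva⟩
    have hv0 : 0 ≤ v := (hcd_lt v hvcds).1
    have hvhalf : v ≤ n / 2 := (hcd_lt v hvcds).2.2
    symm
    apply loopB_eq_of_least words target n s (n / 2 + 1) (n / 2 + 1).toNat 0 v
    · omega
    · exact hv0
    · omega
    · rw [← hva]; exact probe_of_mem words target s a hs hsn ha
    · intro x h1 h2
      by_contra hpx
      rw [Bool.not_eq_false] at hpx
      rcases probe_exhibits words target s x hs hsn h1 (by omega) hpx with ⟨a', ha', hlex⟩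
      have : v ≤ min a' (n - a') := hle.2 _ (List.mem_map_of_mem ha')
      omega
  · rw [if_pos hc]
    symm
    apply loopB_none
    intro x hx
    by_contra hpx
    rw [Bool.not_eq_false] at hpx
    unfold probeB at hpx
    rw [Bool.or_eq_true, beq_iff_eq, beq_iff_eq] at hpx
    have : target ∈ words := by
      rcases hpx with h | h
      · exact mem_of_pyGet? _ _ _ h
      · exact mem_of_pyGet? _ _ _ h
    exact hc (List.contains_iff_mem.mpr this)
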